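-- pv_equiv track=rewrite | github.com/AHWALab/TITOWA_1km | tito_utils/ef5/ef5_routines.py | _apply_hsaf_control_overrides
-- ===== SOURCE A (Python) =====
-- def _apply_hsaf_control_overrides(lines):
--     """Adjust generated EF5 control lines for HSAF forcing.
--
--     - Comment the full IMERG forcing block.
--     - Insert HSAF forcing block right after IMERG block.
--     - In Task Simulation_QPE and Task Simulation_QPF, switch PRECIP to HSAF and TIMESTEP to 10u.
--     """
--     out = []
--     i = 0
--     inserted_hsaf_block = False
--     in_qpe_task = False
--     in_qpf_task = False
--
--     while i < len(lines):
--         line = lines[i]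
--         stripped = line.strip()
--
--         # Track whether we are inside Task Simulation_QPE block.
--         if stripped == "[Task Simulation_QPE]":
--             in_qpe_task = True
--             in_qpf_task = False
--         elif stripped == "[Task Simulation_QPF]":
--             in_qpf_task = True
--             in_qpe_task = False
--         elif stripped.startswith("[") and stripped != "[Task Simulation_QPE]":
--             in_qpe_task = False
--             in_qpf_task = False
--
--         # Comment IMERG forcing block and add HSAF block below it.
--         if stripped == "[PrecipForcing IMERG]":
--             while i < len(lines):
--                 block_line = lines[i]
--                 block_stripped = block_line.strip()
--                 if i > 0 and block_stripped.startswith("[") and block_stripped != "[PrecipForcing IMERG]":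
--                     break
--                 if block_line.lstrip().startswith("#"):
--                     out.append(block_line)
--                 else:
--                     out.append("#" + block_line)
--                 i += 1
--
--             if not inserted_hsaf_block:
--                 out.extend([
--                     "[PrecipForcing HSAF]\n",
--                     "TYPE=TIF\n",
--                     "UNIT=mm/h\n",
--                     "FREQ=10u\n",
--                     "LOC=precipEF5/\n",
--                     "NAME=h40_YYYYMMDD_HHUU_fdk.tif\n",
--                     "\n",
--                 ])
--                 inserted_hsaf_block = True
--             continue
--
--         if (in_qpe_task or in_qpf_task) and stripped.startswith("PRECIP="):
--             out.append("PRECIP=HSAF\n")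
--             i += 1
--             continue
--
--         if (in_qpe_task or in_qpf_task) and stripped.startswith("TIMESTEP="):
--             out.append("TIMESTEP=10u\n")
--             i += 1
--             continue
--
--         out.append(line)
--         i += 1
--
--     return out
-- ===== SOURCE B (Python) =====
-- HSAF_BLOCK = [
--     "[PrecipForcing HSAF]\n",
--     "TYPE=TIF\n",
--     "UNIT=mm/h\n",
--     "FREQ=10u\n",
--     "LOC=precipEF5/\n",
--     "NAME=h40_YYYYMMDD_HHUU_fdk.tif\n",
--     "\n",
-- ]
--
--
-- def _comment(line):
--     """Prefix a line with '#' unless it is already commented."""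
--     return line if line.lstrip().startswith("#") else "#" + line
--
--
-- def _process(line, stripped, out, inserted, in_qpe, in_qpf):
--     """Handle one line outside an IMERG block; returns updated flags
--     (inserted, in_qpe, in_qpf, in_imerg)."""
--     if stripped == "[Task Simulation_QPE]":
--         in_qpe, in_qpf = True, False
--     elif stripped == "[Task Simulation_QPF]":
--         in_qpf, in_qpe = True, False
--     elif stripped.startswith("["):
--         in_qpe = in_qpf = False
--
--     if stripped == "[PrecipForcing IMERG]":
--         out.append(_comment(line))
--         return inserted, in_qpe, in_qpf, True
--     if (in_qpe or in_qpf) and stripped.startswith("PRECIP="):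
--         out.append("PRECIP=HSAF\n")
--     elif (in_qpe or in_qpf) and stripped.startswith("TIMESTEP="):
--         out.append("TIMESTEP=10u\n")
--     else:
--         out.append(line)
--     return inserted, in_qpe, in_qpf, False
--
--
-- def _apply_hsaf_control_overrides(lines):
--     """Flat single pass: an `in_imerg` flag replaces A's nested consume-loop."""
--     out = []
--     inserted = False
--     in_qpe = in_qpf = in_imerg = False
--     for line in lines:
--         stripped = line.strip()
--         if in_imerg:
--             if stripped.startswith("[") and stripped != "[PrecipForcing IMERG]":
--                 # IMERG block ends here: emit the HSAF block once, then
--                 # handle this header normally.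
--                 if not inserted:
--                     out.extend(HSAF_BLOCK)
--                     inserted = True
--                 inserted, in_qpe, in_qpf, in_imerg = _process(
--                     line, stripped, out, inserted, in_qpe, in_qpf)
--             else:
--                 out.append(_comment(line))
--         else:
--             inserted, in_qpe, in_qpf, in_imerg = _process(
--                 line, stripped, out, inserted, in_qpe, in_qpf)
--     if in_imerg and not inserted:
--         out.extend(HSAF_BLOCK)
--     return out
-- ===== Notes on version B (the rewrite author's own statement) =====
-- stated objective: simpler
-- what changed: A's nested inner while-loop that consumes the IMERG block (with index bookkeeping and an outer 'continue') is replaced by a flat single pass over the lines that carries an extra in_imerg boolean state, flushing the HSAF block when the next section header or end-of-input is reached.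
import Mathlib
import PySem

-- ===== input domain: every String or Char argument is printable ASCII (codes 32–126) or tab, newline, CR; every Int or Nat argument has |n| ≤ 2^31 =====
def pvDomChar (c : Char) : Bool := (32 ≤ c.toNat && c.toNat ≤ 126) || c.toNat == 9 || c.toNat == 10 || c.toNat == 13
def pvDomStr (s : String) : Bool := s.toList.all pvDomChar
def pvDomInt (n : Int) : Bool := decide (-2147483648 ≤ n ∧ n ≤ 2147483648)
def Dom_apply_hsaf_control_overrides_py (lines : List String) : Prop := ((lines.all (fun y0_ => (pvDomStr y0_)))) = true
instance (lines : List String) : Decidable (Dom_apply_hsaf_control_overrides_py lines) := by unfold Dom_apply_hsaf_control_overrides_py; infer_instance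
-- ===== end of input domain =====

-- B replaces A's nested consume-loop for the IMERG block by a flat single pass with an
-- extra `in_imerg` flag (objective: simpler decomposition; same cost).

-- The HSAF forcing block inserted by both versions (same literal list in both Pythons).
def pvHsafBlock : List String :=
  ["[PrecipForcing HSAF]\n", "TYPE=TIF\n", "UNIT=mm/h\n", "FREQ=10u\n",
   "LOC=precipEF5/\n", "NAME=h40_YYYYMMDD_HHUU_fdk.tif\n", "\n"]

-- `line if line.lstrip().startswith("#") else "#" + line` (identical expression in A and B).
def pvComment (l : String) : String :=
  if PySem.Str.startswith (PySem.Str.lstrip l) "#" then l else "#" ++ l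

-- ===== PORT A =====

-- A's inner `while` consuming the IMERG block: takes the current index `i` and the
-- remaining suffix `lines[i:]`; returns (out, new i, remaining suffix).
def aInner (i : Nat) (rest : List String) (out : List String) :
    List String × Nat × List String :=
  match rest with
  | [] => (out, i, [])
  | bl :: rs =>
    let bs := PySem.Str.strip bl
    if (decide (0 < i)) && PySem.Str.startswith bs "[" && bs != "[PrecipForcing IMERG]" then
      (out, i, bl :: rs)
    else
      aInner (i + 1) rs (out ++ [pvComment bl])

theorem aInner_len (i : Nat) (rest out : List String) :
    (aInner i rest out).2.2.length ≤ rest.length := by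
  induction rest generalizing i out with
  | nil => simp [aInner]
  | cons bl rs ih =>
    simp only [aInner]
    split
    · simp
    · exact le_trans (ih _ _) (Nat.le_succ _)

theorem aInner_header_len (i : Nat) (line : String) (rs out : List String)
    (h : PySem.Str.strip line = "[PrecipForcing IMERG]") :
    (aInner i (line :: rs) out).2.2.length ≤ rs.length := by
  simp only [aInner, h]
  have hne : ("[PrecipForcing IMERG]" != "[PrecipForcing IMERG]") = false := by decide
  simp only [hne, Bool.and_false]
  exact aInner_len _ _ _

-- A's outer `while` loop: index `i`, remaining suffix, inserted/in_qpe/in_qpf flags, out.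
def aLoop (i : Nat) (rest : List String) (inserted inq inf : Bool)
    (out : List String) : List String :=
  match rest with
  | [] => out
  | line :: rs =>
    let s := PySem.Str.strip line
    let st :=
      if s == "[Task Simulation_QPE]" then (true, false)
      else if s == "[Task Simulation_QPF]" then (false, true)
      else if PySem.Str.startswith s "[" && s != "[Task Simulation_QPE]" then (false, false)
      else (inq, inf)
    let inq := st.1
    let inf := st.2
    if _hIm : PySem.Str.strip line = "[PrecipForcing IMERG]" then
      let r := aInner i (line :: rs) out
      let p := if !inserted then (r.1 ++ pvHsafBlock, true) else (r.1, inserted)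
      aLoop r.2.1 r.2.2 p.2 inq inf p.1
    else if (inq || inf) && PySem.Str.startswith s "PRECIP=" then
      aLoop (i + 1) rs inserted inq inf (out ++ ["PRECIP=HSAF\n"])
    else if (inq || inf) && PySem.Str.startswith s "TIMESTEP=" then
      aLoop (i + 1) rs inserted inq inf (out ++ ["TIMESTEP=10u\n"])
    else
      aLoop (i + 1) rs inserted inq inf (out ++ [line])
termination_by rest.length
decreasing_by
  · exact Nat.lt_succ_of_le (aInner_header_len i line rs out _hIm)
  · simp
  · simp
  · simp

def apply_hsaf_control_overrides_py (lines : List String) : List String :=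
  aLoop 0 lines false false false []

-- ===== PORT B =====

-- B's `_process`: handle one line outside an IMERG block;
-- returns (out, inserted, in_qpe, in_qpf, in_imerg).
def bProcess (line s : String) (out : List String) (inserted inq inf : Bool) :
    List String × Bool × Bool × Bool × Bool :=
  let st :=
    if s == "[Task Simulation_QPE]" then (true, false)
    else if s == "[Task Simulation_QPF]" then (false, true)
    else if PySem.Str.startswith s "[" then (false, false)
    else (inq, inf)
  let inq := st.1
  let inf := st.2
  if s == "[PrecipForcing IMERG]" then
    (out ++ [pvComment line], inserted, inq, inf, true)
  else if (inq || inf) && PySem.Str.startswith s "PRECIP=" then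
    (out ++ ["PRECIP=HSAF\n"], inserted, inq, inf, false)
  else if (inq || inf) && PySem.Str.startswith s "TIMESTEP=" then
    (out ++ ["TIMESTEP=10u\n"], inserted, inq, inf, false)
  else
    (out ++ [line], inserted, inq, inf, false)

-- B's single `for` pass; returns (out, inserted, in_imerg).
def bLoop : List String → List String → Bool → Bool → Bool → Bool →
    List String × Bool × Bool
  | [], out, inserted, _, _, inim => (out, inserted, inim)
  | line :: rs, out, inserted, inq, inf, inim =>
    let s := PySem.Str.strip line
    if inim then
      if PySem.Str.startswith s "[" && s != "[PrecipForcing IMERG]" then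
        let p := if !inserted then (out ++ pvHsafBlock, true) else (out, inserted)
        let q := bProcess line s p.1 p.2 inq inf
        bLoop rs q.1 q.2.1 q.2.2.1 q.2.2.2.1 q.2.2.2.2
      else
        bLoop rs (out ++ [pvComment line]) inserted inq inf true
    else
      let q := bProcess line s out inserted inq inf
      bLoop rs q.1 q.2.1 q.2.2.1 q.2.2.2.1 q.2.2.2.2

def apply_hsaf_control_overrides_py_alt (lines : List String) : List String :=
  let r := bLoop lines [] false false false false
  if r.2.2 && !r.2.1 then r.1 ++ pvHsafBlock else r.1

-- ===== PRECONDITION & SPEC =====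
def Spec_apply_hsaf_control_overrides_py (lines : List String) (out : List String) : Prop := out = apply_hsaf_control_overrides_py_alt lines
instance (lines : List String) (out : List String) : Decidable (Spec_apply_hsaf_control_overrides_py lines out) := by unfold Spec_apply_hsaf_control_overrides_py; infer_instance

-- ===== CLAIM (what is proved, stated in full; the proofs are below) =====
def Claim_equal_apply_hsaf_control_overrides_py : Prop := ∀ (lines : List String), Dom_apply_hsaf_control_overrides_py lines → Spec_apply_hsaf_control_overrides_py lines (apply_hsaf_control_overrides_py lines)

-- ===== LEMMAS AND PROOFS =====

-- The end-of-pass flush of B's main function, as a function of bLoop's result.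
def bFinish (r : List String × Bool × Bool) : List String :=
  if r.2.2 && !r.2.1 then r.1 ++ pvHsafBlock else r.1

-- A's continuation from inside the IMERG consume-loop: run the inner loop, insert
-- the HSAF block (once), then continue the outer loop.
def aAfterInner (i : Nat) (rest : List String) (inserted inq inf : Bool)
    (out : List String) : List String :=
  let r := aInner i rest out
  let p := if !inserted then (r.1 ++ pvHsafBlock, true) else (r.1, inserted)
  aLoop r.2.1 r.2.2 p.2 inq inf p.1

theorem main_corr (n : Nat) : ∀ (rest : List String), rest.length ≤ n →
    (∀ (i : Nat) (inserted inq inf : Bool) (out : List String),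
      aLoop i rest inserted inq inf out = bFinish (bLoop rest out inserted inq inf false)) ∧
    (∀ (i : Nat) (inserted inq inf : Bool) (out : List String), 1 ≤ i →
      aAfterInner i rest inserted inq inf out = bFinish (bLoop rest out inserted inq inf true)) := by
  induction n with
  | zero =>
    intro rest hlen
    have hrest : rest = [] := List.eq_nil_of_length_eq_zero (Nat.le_zero.mp hlen)
    subst hrest
    constructor
    · intro i inserted inq inf out
      simp [aLoop, bLoop, bFinish]
    · intro i inserted inq inf out hi
      cases inserted <;> simp [aAfterInner, aInner, aLoop, bLoop, bFinish]
  | succ n ih =>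
    intro rest hlen
    cases rest with
    | nil =>
      constructor
      · intro i inserted inq inf out
        simp [aLoop, bLoop, bFinish]
      · intro i inserted inq inf out hi
        cases inserted <;> simp [aAfterInner, aInner, aLoop, bLoop, bFinish]
    | cons line rs =>
      have hrs : rs.length ≤ n := Nat.le_of_succ_le_succ hlen
      have ihout := (ih rs hrs).1
      have ihin := (ih rs hrs).2
      have hout : ∀ (i : Nat) (inserted inq inf : Bool) (out : List String),
          aLoop i (line :: rs) inserted inq inf out
            = bFinish (bLoop (line :: rs) out inserted inq inf false) := by
        intro i inserted inq inf out
        by_cases hIm : PySem.Str.strip line = "[PrecipForcing IMERG]"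
        · -- IMERG header: A enters the inner loop; B comments it and sets in_imerg.
          have hne : ("[PrecipForcing IMERG]" != "[PrecipForcing IMERG]") = false := by decide
          have hqe : PySem.Str.strip line ≠ "[Task Simulation_QPE]" := by rw [hIm]; decide
          have hqf : PySem.Str.strip line ≠ "[Task Simulation_QPF]" := by rw [hIm]; decide
          have hsb : PySem.Str.startswith (PySem.Str.strip line) "[" = true := by rw [hIm]; decide
          have hstep : aInner i (line :: rs) out = aInner (i + 1) rs (out ++ [pvComment line]) := by
            simp [aInner, hIm, hne]
          rw [aLoop]
          simp only [hIm, hqe, hqf, hsb, dif_pos, if_pos, bne_iff_ne, ne_eq, hstep]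
          have := ihin (i + 1) inserted false false (out ++ [pvComment line]) (Nat.le_add_left 1 i)
          simp only [aAfterInner] at this
          simp only [bLoop, bProcess, hIm]
          simp only [beq_iff_eq, hqe, hqf, if_false, hsb, Bool.true_and, if_true,
            beq_self_eq_true, if_pos, bne_iff_ne, ne_eq]
          -- Align A's branch with the lemma and B's unfolding.
          simpa [hqe, hqf, hsb] using this
        · -- non-IMERG line: both sides process it identically and recurse.
          rw [aLoop]
          simp only [hIm, dif_neg, not_false_iff]
          simp only [bLoop, bProcess]
          have him' : ((PySem.Str.strip line) == "[PrecipForcing IMERG]") = false := by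
            simp [hIm]
          by_cases hqe : PySem.Str.strip line = "[Task Simulation_QPE]"
          · have hA : PySem.Chars.startswith ['[', 'T', 'a', 's', 'k', ' ', 'S', 'i', 'm', 'u', 'l', 'a', 't', 'i', 'o', 'n', '_', 'Q', 'P', 'E', ']'] ['P', 'R', 'E', 'C', 'I', 'P', '='] = false := by decide
            have hB : PySem.Chars.startswith ['[', 'T', 'a', 's', 'k', ' ', 'S', 'i', 'm', 'u', 'l', 'a', 't', 'i', 'o', 'n', '_', 'Q', 'P', 'E', ']'] ['T', 'I', 'M', 'E', 'S', 'T', 'E', 'P', '='] = false := by decide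
            simp only [hqe] at him' ⊢
            simp [ihout, him', hA, hB]
          · by_cases hqf : PySem.Str.strip line = "[Task Simulation_QPF]"
            · have hA : PySem.Chars.startswith ['[', 'T', 'a', 's', 'k', ' ', 'S', 'i', 'm', 'u', 'l', 'a', 't', 'i', 'o', 'n', '_', 'Q', 'P', 'F', ']'] ['P', 'R', 'E', 'C', 'I', 'P', '='] = false := by decide
              have hB : PySem.Chars.startswith ['[', 'T', 'a', 's', 'k', ' ', 'S', 'i', 'm', 'u', 'l', 'a', 't', 'i', 'o', 'n', '_', 'Q', 'P', 'F', ']'] ['T', 'I', 'M', 'E', 'S', 'T', 'E', 'P', '='] = false := by decide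
              simp only [hqf] at him' ⊢
              simp [ihout, him', hqe, hA, hB]
            · -- generic non-header / PRECIP / TIMESTEP line: both sides take the same
              -- if-chain with identical conditions, then recurse via ihout.
              simp [hqe, hqf, him', ihout]
              try split_ifs <;> simp [ihout]
      have hin : ∀ (i : Nat) (inserted inq inf : Bool) (out : List String), 1 ≤ i →
          aAfterInner i (line :: rs) inserted inq inf out
            = bFinish (bLoop (line :: rs) out inserted inq inf true) := by
        intro i inserted inq inf out hi
        have hi' : (decide (0 < i)) = true := by simpa using hi
        by_cases hbr : (PySem.Str.startswith (PySem.Str.strip line) "[" &&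
            (PySem.Str.strip line) != "[PrecipForcing IMERG]") = true
        · -- break line: A leaves the inner loop, inserts, and reprocesses the line;
          -- B flushes and falls through to normal processing of the same line.
          have hstep : aInner i (line :: rs) out = (out, i, line :: rs) := by
            simp only [aInner, hi', Bool.true_and, hbr, if_true]
          simp only [aAfterInner, hstep]
          rw [hout i]
          simp only [bLoop, hbr, if_true]
          rfl
        · -- interior line: both comment it and stay in the block.
          have hstep : aInner i (line :: rs) out = aInner (i + 1) rs (out ++ [pvComment line]) := by
            simp only [aInner]
            rw [if_neg]
            simp only [hi', Bool.true_and]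
            exact fun h => hbr h
          have := ihin (i + 1) inserted inq inf (out ++ [pvComment line]) (Nat.le_add_left 1 i)
          simp only [aAfterInner] at this ⊢
          rw [hstep, this]
          simp only [bLoop, hbr, if_false]
          rfl
      exact ⟨hout, hin⟩

-- ===== VERDICT (by name: the statement is the Claim_ definition above) =====
theorem apply_hsaf_control_overrides_py_spec : Claim_equal_apply_hsaf_control_overrides_py := by
  intro lines _
  unfold Spec_apply_hsaf_control_overrides_py apply_hsaf_control_overrides_py
    apply_hsaf_control_overrides_py_alt
  have := (main_corr lines.length lines le_rfl).1 0 false false false []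
  simpa [bFinish] using this
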